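-- pv_equiv track=rewrite | github.com/pypi-data/pypi-mirror-374 | packages/commit-for-free/commit_for_free-1.1.5-py3-none-any.whl/c4f/_purifier.py | _find_combined_type_and_scope
-- ===== SOURCE A (Python) =====
-- from typing import Optional
--
-- def _find_combined_type_and_scope(first_part: str) -> tuple[Optional[str], str]:
--     """Find a combined commit type and scope in the first part.
--
--     Args:
--         first_part: The first part of the commit message.
--
--     Returns:
--         tuple: A tuple containing the commit type and scope if found, or (None, "") if not found.
--     """
--     commit_types = [
--         "feat",
--         "fix",
--         "docs",
--         "style",
--         "refactor",
--         "perf",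
--         "test",
--         "build",
--         "ci",
--         "chore",
--         "revert",
--         "security",
--     ]
--
--     for commit_type in commit_types:
--         if first_part.lower().startswith(commit_type) and len(first_part) > len(
--             commit_type
--         ):
--             scope = first_part[len(commit_type) :]
--             return commit_type, scope
--
--     return None, ""
-- ===== SOURCE B (Python) =====
-- from typing import Optional
--
-- _COMMIT_TYPES = (
--     "feat",
--     "fix",
--     "docs",
--     "style",
--     "refactor",
--     "perf",
--     "test",
--     "build",
--     "ci",
--     "chore",
--     "revert",
--     "security",
-- )
--
-- def _find_combined_type_and_scope(first_part: str) -> tuple[Optional[str], str]: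
--     """Find a combined commit type and scope in the first part.
--
--     Walks the lowered input once, char by char, narrowing the set of still-viable
--     commit-type suffixes (classic multi-pattern prefix matching).  When some
--     candidate is fully consumed we matched a type (the names are prefix-free, so
--     it is unique); if characters remain after it, that is the scope.
--     """
--     lowered = first_part.lower()
--     rests = list(_COMMIT_TYPES)
--     for i, ch in enumerate(lowered):
--         rests = [r[1:] for r in rests if r and r[0] == ch]
--         if "" in rests:
--             if i + 1 < len(first_part):
--                 return lowered[: i + 1], first_part[i + 1:]
--             return None, ""
--         if not rests:
--             return None, ""
--     return None, ""
-- ===== Notes on version B (the rewrite author's own statement) =====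
-- stated objective: alternative
-- what changed: Replaces the 12 independent startswith probes with a single char-by-char walk of the lowered input that narrows a set of still-viable commit-type suffixes (multi-pattern prefix matching over a prefix-free name set).
import Mathlib
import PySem

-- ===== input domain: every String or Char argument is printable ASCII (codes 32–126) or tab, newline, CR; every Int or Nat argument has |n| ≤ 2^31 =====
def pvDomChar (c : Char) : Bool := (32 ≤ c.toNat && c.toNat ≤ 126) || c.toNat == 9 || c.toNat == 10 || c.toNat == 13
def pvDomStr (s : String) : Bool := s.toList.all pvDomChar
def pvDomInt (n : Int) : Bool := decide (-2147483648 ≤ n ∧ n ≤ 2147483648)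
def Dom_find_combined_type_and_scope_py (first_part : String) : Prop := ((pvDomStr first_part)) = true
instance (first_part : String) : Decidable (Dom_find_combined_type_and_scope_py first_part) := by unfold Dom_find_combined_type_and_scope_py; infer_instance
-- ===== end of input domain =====

-- B replaces A's 12 independent startswith probes by one char-by-char walk of the lowered
-- input that narrows the set of still-viable commit-type suffixes (objective: alternative).

-- ===== PORT A =====
def pvCommitTypesA : List String :=
  ["feat", "fix", "docs", "style", "refactor", "perf", "test", "build", "ci", "chore", "revert", "security"]

def pvLoopA (first_part : String) : List String → Option String × String
  | [] => (none, "")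
  | commit_type :: rest =>
    if PySem.Str.startswith (PySem.Str.lower first_part) commit_type
        && decide (PySem.Str.len commit_type < PySem.Str.len first_part) then
      (some commit_type, PySem.Str.slice first_part (some (PySem.Str.len commit_type)) none)
    else pvLoopA first_part rest

def find_combined_type_and_scope_py (first_part : String) : Option String × String :=
  pvLoopA first_part pvCommitTypesA

-- ===== PORT B =====
-- rests = [r[1:] for r in rests if r and r[0] == ch]   (candidate suffixes are List Char)
def pvStep (ch : Char) (rests : List (List Char)) : List (List Char) :=
  (rests.filter (fun r => !r.isEmpty && r.head? == some ch)).map (List.drop 1)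

-- the 'for i, ch in enumerate(lowered)' loop of B
def pvScan (first_part : String) : List Char → Int → List (List Char) → Option String × String
  | [], _, _ => (none, "")
  | ch :: rest, i, rests =>
    let rests' := pvStep ch rests
    if rests'.contains [] then
      if i + 1 < PySem.Str.len first_part then
        (some (PySem.Str.slice (PySem.Str.lower first_part) none (some (i + 1))),
         PySem.Str.slice first_part (some (i + 1)) none)
      else (none, "")
    else if rests'.isEmpty then (none, "")
    else pvScan first_part rest (i + 1) rests'

def find_combined_type_and_scope_py_alt (first_part : String) : Option String × String :=
  pvScan first_part (PySem.Str.lower first_part).toList 0 (pvCommitTypesA.map String.toList)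

-- ===== PRECONDITION & SPEC =====
def Spec_find_combined_type_and_scope_py (first_part : String) (out : Option String × String) : Prop := out = find_combined_type_and_scope_py_alt first_part
instance (first_part : String) (out : Option String × String) : Decidable (Spec_find_combined_type_and_scope_py first_part out) := by unfold Spec_find_combined_type_and_scope_py; infer_instance

-- ===== CLAIM (what is proved, stated in full; the proofs are below) =====
def Claim_equal_find_combined_type_and_scope_py : Prop := ∀ (first_part : String), Dom_find_combined_type_and_scope_py first_part → Spec_find_combined_type_and_scope_py first_part (find_combined_type_and_scope_py first_part)

-- ===== LEMMAS AND PROOFS =====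

def pvLow (fp : String) : List Char := PySem.Chars.lower fp.toList

def pvTL : List (List Char) := pvCommitTypesA.map String.toList

-- t is a "hit": the lowered input starts with t and is strictly longer than t.
def pvHit (fp t : String) : Prop :=
  t.toList <+: pvLow fp ∧ t.toList.length < fp.toList.length

def pvPredOut (fp : String) (t : String) : Bool :=
  t.toList.isPrefixOf (pvLow fp) && decide (t.toList.length < (pvLow fp).length)

-- the common value both programs compute
def pvOut (fp : String) : Option String × String :=
  match pvCommitTypesA.find? (pvPredOut fp) with
  | some t => (some t, PySem.Str.slice fp (some (PySem.Str.len t)) none)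
  | none => (none, "")

-- candidate suffixes after consuming k characters (strict: survivors still have a char left)
def pvSfx (fp : String) (k : Nat) : List (List Char) :=
  pvTL.filterMap (fun t => if k < t.length ∧ t.take k = (pvLow fp).take k then some (t.drop k) else none)

-- same, but keeping fully-consumed candidates (the shape right after a filter step)
def pvSfxE (fp : String) (k : Nat) : List (List Char) :=
  pvTL.filterMap (fun t => if k ≤ t.length ∧ t.take k = (pvLow fp).take k then some (t.drop k) else none)

theorem pvLowLen (fp : String) : (pvLow fp).length = fp.toList.length := by
  simp [pvLow, PySem.Chars.lower]

theorem pvPredOut_iff (fp t : String) : pvPredOut fp t = true ↔ pvHit fp t := by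
  simp [pvPredOut, pvHit, List.isPrefixOf_iff_prefix, pvLowLen]

theorem pvCondA_iff (fp t : String) :
    (PySem.Str.startswith (PySem.Str.lower fp) t
        && decide (PySem.Str.len t < PySem.Str.len fp)) = true ↔ pvHit fp t := by
  simp [PySem.Str.startswith, PySem.Chars.startswith, PySem.Str.lower, String.toList_ofList,
    PySem.Str.len_eq, pvHit, pvLow, List.isPrefixOf_iff_prefix]

theorem pvSkipA (fp t : String) (rest : List String) (h : ¬ pvHit fp t) :
    pvLoopA fp (t :: rest) = pvLoopA fp rest := by
  rw [pvLoopA, if_neg (fun hc => h ((pvCondA_iff fp t).mp hc))]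

theorem pvFireA (fp t : String) (rest : List String) (h : pvHit fp t) :
    pvLoopA fp (t :: rest)
      = (some t, PySem.Str.slice fp (some (PySem.Str.len t)) none) := by
  rw [pvLoopA, if_pos ((pvCondA_iff fp t).mpr h)]

-- no commit type is a proper prefix of another
theorem pvPrefixFree :
    ∀ t ∈ pvCommitTypesA, ∀ t' ∈ pvCommitTypesA, t.toList.isPrefixOf t'.toList = true → t = t' := by
  decide

theorem pvHitUnique (fp : String) {t t' : String}
    (ht : t ∈ pvCommitTypesA) (ht' : t' ∈ pvCommitTypesA)
    (h : t.toList <+: pvLow fp) (h' : t'.toList <+: pvLow fp) : t = t' := by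
  rcases List.prefix_or_prefix_of_prefix h h' with hp | hp
  · exact pvPrefixFree t ht t' ht' (List.isPrefixOf_iff_prefix.mpr hp)
  · exact (pvPrefixFree t' ht' t ht (List.isPrefixOf_iff_prefix.mpr hp)).symm

theorem pvNoHitOfHit (fp t0 t' : String) (ht0 : t0 ∈ pvCommitTypesA) (ht' : t' ∈ pvCommitTypesA)
    (h0 : t0.toList <+: pvLow fp) (hne : t' ≠ t0) : ¬ pvHit fp t' :=
  fun h' => hne (pvHitUnique fp ht' ht0 h'.1 h0)

theorem pvMemCases : ∀ t ∈ pvCommitTypesA, t = "feat" ∨ t = "fix" ∨ t = "docs" ∨ t = "style" ∨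
    t = "refactor" ∨ t = "perf" ∨ t = "test" ∨ t = "build" ∨ t = "ci" ∨ t = "chore" ∨
    t = "revert" ∨ t = "security" := by decide

theorem pvAOfHit (fp t0 : String) (ht0 : t0 ∈ pvCommitTypesA) (h0 : pvHit fp t0) :
    find_combined_type_and_scope_py fp
      = (some t0, PySem.Str.slice fp (some (PySem.Str.len t0)) none) := by
  have hm := pvMemCases t0 ht0
  rw [find_combined_type_and_scope_py]
  simp only [pvCommitTypesA]
  rcases hm with rfl | rfl | rfl | rfl | rfl | rfl | rfl | rfl | rfl | rfl | rfl | rfl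
  · exact pvFireA fp "feat" _ h0
  · rw [pvSkipA fp "feat" _ (pvNoHitOfHit fp "fix" "feat" ht0 (by decide) h0.1 (by decide))]
    exact pvFireA fp "fix" _ h0
  · rw [pvSkipA fp "feat" _ (pvNoHitOfHit fp "docs" "feat" ht0 (by decide) h0.1 (by decide))]
    rw [pvSkipA fp "fix" _ (pvNoHitOfHit fp "docs" "fix" ht0 (by decide) h0.1 (by decide))]
    exact pvFireA fp "docs" _ h0
  · rw [pvSkipA fp "feat" _ (pvNoHitOfHit fp "style" "feat" ht0 (by decide) h0.1 (by decide))]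
    rw [pvSkipA fp "fix" _ (pvNoHitOfHit fp "style" "fix" ht0 (by decide) h0.1 (by decide))]
    rw [pvSkipA fp "docs" _ (pvNoHitOfHit fp "style" "docs" ht0 (by decide) h0.1 (by decide))]
    exact pvFireA fp "style" _ h0
  · rw [pvSkipA fp "feat" _ (pvNoHitOfHit fp "refactor" "feat" ht0 (by decide) h0.1 (by decide))]
    rw [pvSkipA fp "fix" _ (pvNoHitOfHit fp "refactor" "fix" ht0 (by decide) h0.1 (by decide))]
    rw [pvSkipA fp "docs" _ (pvNoHitOfHit fp "refactor" "docs" ht0 (by decide) h0.1 (by decide))]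
    rw [pvSkipA fp "style" _ (pvNoHitOfHit fp "refactor" "style" ht0 (by decide) h0.1 (by decide))]
    exact pvFireA fp "refactor" _ h0
  · rw [pvSkipA fp "feat" _ (pvNoHitOfHit fp "perf" "feat" ht0 (by decide) h0.1 (by decide))]
    rw [pvSkipA fp "fix" _ (pvNoHitOfHit fp "perf" "fix" ht0 (by decide) h0.1 (by decide))]
    rw [pvSkipA fp "docs" _ (pvNoHitOfHit fp "perf" "docs" ht0 (by decide) h0.1 (by decide))]
    rw [pvSkipA fp "style" _ (pvNoHitOfHit fp "perf" "style" ht0 (by decide) h0.1 (by decide))]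
    rw [pvSkipA fp "refactor" _ (pvNoHitOfHit fp "perf" "refactor" ht0 (by decide) h0.1 (by decide))]
    exact pvFireA fp "perf" _ h0
  · rw [pvSkipA fp "feat" _ (pvNoHitOfHit fp "test" "feat" ht0 (by decide) h0.1 (by decide))]
    rw [pvSkipA fp "fix" _ (pvNoHitOfHit fp "test" "fix" ht0 (by decide) h0.1 (by decide))]
    rw [pvSkipA fp "docs" _ (pvNoHitOfHit fp "test" "docs" ht0 (by decide) h0.1 (by decide))]
    rw [pvSkipA fp "style" _ (pvNoHitOfHit fp "test" "style" ht0 (by decide) h0.1 (by decide))]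
    rw [pvSkipA fp "refactor" _ (pvNoHitOfHit fp "test" "refactor" ht0 (by decide) h0.1 (by decide))]
    rw [pvSkipA fp "perf" _ (pvNoHitOfHit fp "test" "perf" ht0 (by decide) h0.1 (by decide))]
    exact pvFireA fp "test" _ h0
  · rw [pvSkipA fp "feat" _ (pvNoHitOfHit fp "build" "feat" ht0 (by decide) h0.1 (by decide))]
    rw [pvSkipA fp "fix" _ (pvNoHitOfHit fp "build" "fix" ht0 (by decide) h0.1 (by decide))]
    rw [pvSkipA fp "docs" _ (pvNoHitOfHit fp "build" "docs" ht0 (by decide) h0.1 (by decide))]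
    rw [pvSkipA fp "style" _ (pvNoHitOfHit fp "build" "style" ht0 (by decide) h0.1 (by decide))]
    rw [pvSkipA fp "refactor" _ (pvNoHitOfHit fp "build" "refactor" ht0 (by decide) h0.1 (by decide))]
    rw [pvSkipA fp "perf" _ (pvNoHitOfHit fp "build" "perf" ht0 (by decide) h0.1 (by decide))]
    rw [pvSkipA fp "test" _ (pvNoHitOfHit fp "build" "test" ht0 (by decide) h0.1 (by decide))]
    exact pvFireA fp "build" _ h0
  · rw [pvSkipA fp "feat" _ (pvNoHitOfHit fp "ci" "feat" ht0 (by decide) h0.1 (by decide))]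
    rw [pvSkipA fp "fix" _ (pvNoHitOfHit fp "ci" "fix" ht0 (by decide) h0.1 (by decide))]
    rw [pvSkipA fp "docs" _ (pvNoHitOfHit fp "ci" "docs" ht0 (by decide) h0.1 (by decide))]
    rw [pvSkipA fp "style" _ (pvNoHitOfHit fp "ci" "style" ht0 (by decide) h0.1 (by decide))]
    rw [pvSkipA fp "refactor" _ (pvNoHitOfHit fp "ci" "refactor" ht0 (by decide) h0.1 (by decide))]
    rw [pvSkipA fp "perf" _ (pvNoHitOfHit fp "ci" "perf" ht0 (by decide) h0.1 (by decide))]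
    rw [pvSkipA fp "test" _ (pvNoHitOfHit fp "ci" "test" ht0 (by decide) h0.1 (by decide))]
    rw [pvSkipA fp "build" _ (pvNoHitOfHit fp "ci" "build" ht0 (by decide) h0.1 (by decide))]
    exact pvFireA fp "ci" _ h0
  · rw [pvSkipA fp "feat" _ (pvNoHitOfHit fp "chore" "feat" ht0 (by decide) h0.1 (by decide))]
    rw [pvSkipA fp "fix" _ (pvNoHitOfHit fp "chore" "fix" ht0 (by decide) h0.1 (by decide))]
    rw [pvSkipA fp "docs" _ (pvNoHitOfHit fp "chore" "docs" ht0 (by decide) h0.1 (by decide))]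
    rw [pvSkipA fp "style" _ (pvNoHitOfHit fp "chore" "style" ht0 (by decide) h0.1 (by decide))]
    rw [pvSkipA fp "refactor" _ (pvNoHitOfHit fp "chore" "refactor" ht0 (by decide) h0.1 (by decide))]
    rw [pvSkipA fp "perf" _ (pvNoHitOfHit fp "chore" "perf" ht0 (by decide) h0.1 (by decide))]
    rw [pvSkipA fp "test" _ (pvNoHitOfHit fp "chore" "test" ht0 (by decide) h0.1 (by decide))]
    rw [pvSkipA fp "build" _ (pvNoHitOfHit fp "chore" "build" ht0 (by decide) h0.1 (by decide))]
    rw [pvSkipA fp "ci" _ (pvNoHitOfHit fp "chore" "ci" ht0 (by decide) h0.1 (by decide))]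
    exact pvFireA fp "chore" _ h0
  · rw [pvSkipA fp "feat" _ (pvNoHitOfHit fp "revert" "feat" ht0 (by decide) h0.1 (by decide))]
    rw [pvSkipA fp "fix" _ (pvNoHitOfHit fp "revert" "fix" ht0 (by decide) h0.1 (by decide))]
    rw [pvSkipA fp "docs" _ (pvNoHitOfHit fp "revert" "docs" ht0 (by decide) h0.1 (by decide))]
    rw [pvSkipA fp "style" _ (pvNoHitOfHit fp "revert" "style" ht0 (by decide) h0.1 (by decide))]
    rw [pvSkipA fp "refactor" _ (pvNoHitOfHit fp "revert" "refactor" ht0 (by decide) h0.1 (by decide))]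
    rw [pvSkipA fp "perf" _ (pvNoHitOfHit fp "revert" "perf" ht0 (by decide) h0.1 (by decide))]
    rw [pvSkipA fp "test" _ (pvNoHitOfHit fp "revert" "test" ht0 (by decide) h0.1 (by decide))]
    rw [pvSkipA fp "build" _ (pvNoHitOfHit fp "revert" "build" ht0 (by decide) h0.1 (by decide))]
    rw [pvSkipA fp "ci" _ (pvNoHitOfHit fp "revert" "ci" ht0 (by decide) h0.1 (by decide))]
    rw [pvSkipA fp "chore" _ (pvNoHitOfHit fp "revert" "chore" ht0 (by decide) h0.1 (by decide))]
    exact pvFireA fp "revert" _ h0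
  · rw [pvSkipA fp "feat" _ (pvNoHitOfHit fp "security" "feat" ht0 (by decide) h0.1 (by decide))]
    rw [pvSkipA fp "fix" _ (pvNoHitOfHit fp "security" "fix" ht0 (by decide) h0.1 (by decide))]
    rw [pvSkipA fp "docs" _ (pvNoHitOfHit fp "security" "docs" ht0 (by decide) h0.1 (by decide))]
    rw [pvSkipA fp "style" _ (pvNoHitOfHit fp "security" "style" ht0 (by decide) h0.1 (by decide))]
    rw [pvSkipA fp "refactor" _ (pvNoHitOfHit fp "security" "refactor" ht0 (by decide) h0.1 (by decide))]
    rw [pvSkipA fp "perf" _ (pvNoHitOfHit fp "security" "perf" ht0 (by decide) h0.1 (by decide))]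
    rw [pvSkipA fp "test" _ (pvNoHitOfHit fp "security" "test" ht0 (by decide) h0.1 (by decide))]
    rw [pvSkipA fp "build" _ (pvNoHitOfHit fp "security" "build" ht0 (by decide) h0.1 (by decide))]
    rw [pvSkipA fp "ci" _ (pvNoHitOfHit fp "security" "ci" ht0 (by decide) h0.1 (by decide))]
    rw [pvSkipA fp "chore" _ (pvNoHitOfHit fp "security" "chore" ht0 (by decide) h0.1 (by decide))]
    rw [pvSkipA fp "revert" _ (pvNoHitOfHit fp "security" "revert" ht0 (by decide) h0.1 (by decide))]
    exact pvFireA fp "security" _ h0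

theorem pvAOut (fp : String) : find_combined_type_and_scope_py fp = pvOut fp := by
  cases hf : pvCommitTypesA.find? (pvPredOut fp) with
  | some t =>
    have hmem := List.mem_of_find?_eq_some hf
    have hp := List.find?_some hf
    have hhit := (pvPredOut_iff fp t).mp hp
    rw [pvAOfHit fp t hmem hhit, pvOut, hf]
  | none =>
    have h : ∀ t ∈ pvCommitTypesA, ¬ pvHit fp t := by
      intro t ht hhit
      have := List.find?_eq_none.mp hf t ht
      exact this ((pvPredOut_iff fp t).mpr hhit)
    rw [find_combined_type_and_scope_py, pvOut, hf]
    simp only [pvCommitTypesA]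
    rw [pvSkipA fp "feat" _ (h _ (by decide)), pvSkipA fp "fix" _ (h _ (by decide)),
      pvSkipA fp "docs" _ (h _ (by decide)), pvSkipA fp "style" _ (h _ (by decide)),
      pvSkipA fp "refactor" _ (h _ (by decide)), pvSkipA fp "perf" _ (h _ (by decide)),
      pvSkipA fp "test" _ (h _ (by decide)), pvSkipA fp "build" _ (h _ (by decide)),
      pvSkipA fp "ci" _ (h _ (by decide)), pvSkipA fp "chore" _ (h _ (by decide)),
      pvSkipA fp "revert" _ (h _ (by decide)), pvSkipA fp "security" _ (h _ (by decide))]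
    rfl

-- ---- B side ----

theorem pvFindUnique {α : Type} (p : α → Bool) (l : List α) (t0 : α)
    (hmem : t0 ∈ l) (hp : p t0 = true) (huniq : ∀ t ∈ l, p t = true → t = t0) :
    l.find? p = some t0 := by
  induction l with
  | nil => cases hmem
  | cons a l ih =>
    by_cases ha : p a = true
    · rw [List.find?_cons_of_pos ha]
      exact congrArg some (huniq a (List.mem_cons_self) ha)
    · rw [List.find?_cons_of_neg ha]
      rcases List.mem_cons.mp hmem with rfl | hm
      · exact absurd hp ha
      · exact ih hm (fun t ht hpt => huniq t (List.mem_cons_of_mem _ ht) hpt)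

theorem pvStepFM (ch : Char) (f g : List Char → Option (List Char))
    (hfg : ∀ t, g t = match f t with
      | none => none
      | some r => if (!r.isEmpty && r.head? == some ch) = true then some (r.drop 1) else none) :
    ∀ T : List (List Char), pvStep ch (T.filterMap f) = T.filterMap g := by
  intro T
  induction T with
  | nil => rfl
  | cons t T ih =>
    cases hf : f t with
    | none =>
      have hg : g t = none := by rw [hfg t, hf]
      rw [List.filterMap_cons_none hf, List.filterMap_cons_none hg]
      exact ih
    | some r =>
      rw [List.filterMap_cons_some hf]
      by_cases hc : (!r.isEmpty && r.head? == some ch) = true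
      · have hg : g t = some (r.drop 1) := by rw [hfg t, hf]; exact if_pos hc
        rw [List.filterMap_cons_some hg, pvStep, List.filter_cons, if_pos hc, List.map_cons]
        exact congrArg (r.drop 1 :: ·) ih
      · have hg : g t = none := by rw [hfg t, hf]; exact if_neg hc
        rw [List.filterMap_cons_none hg, pvStep, List.filter_cons, if_neg hc]
        exact ih

theorem pvStepSfx (fp : String) (k : Nat) (ch : Char)
    (hch : (pvLow fp)[k]? = some ch) :
    pvStep ch (pvSfx fp k) = pvSfxE fp (k + 1) := by
  rw [pvSfx, pvSfxE]
  apply pvStepFM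
  intro t
  by_cases h1 : k < t.length ∧ t.take k = (pvLow fp).take k
  · rw [if_pos h1]
    show (if k + 1 ≤ t.length ∧ t.take (k + 1) = (pvLow fp).take (k + 1)
            then some (t.drop (k + 1)) else none)
        = if (!(t.drop k).isEmpty && (t.drop k).head? == some ch) = true
            then some ((t.drop k).drop 1) else none
    have hhead : (t.drop k).head? = t[k]? := List.head?_drop
    have hdrop : (t.drop k).drop 1 = t.drop (k + 1) := by rw [List.drop_drop]
    have hne : (t.drop k).isEmpty = false := by
      simp [List.drop_eq_nil_iff]
      omega
    by_cases h2 : t[k]? = some ch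
    · have hcond : (!(t.drop k).isEmpty && (t.drop k).head? == some ch) = true := by
        simp [hne, hhead, h2]
      rw [if_pos hcond, hdrop]
      have htake : t.take (k + 1) = (pvLow fp).take (k + 1) := by
        rw [List.take_add_one, List.take_add_one, h1.2, h2, hch]
      rw [if_pos ⟨by omega, htake⟩]
    · have hcond : (!(t.drop k).isEmpty && (t.drop k).head? == some ch) = false := by
        simp [hne, hhead]
        intro hc; exact h2 (by rw [hc])
      rw [hcond]
      simp only [Bool.false_eq_true, if_false]
      by_cases h3 : k + 1 ≤ t.length ∧ t.take (k + 1) = (pvLow fp).take (k + 1)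
      · exfalso
        apply h2
        have hk1 : t[k]? = (t.take (k + 1))[k]? := by
          rw [List.getElem?_take_of_lt (by omega)]
        rw [hk1, h3.2, List.getElem?_take_of_lt (by omega), hch]
      · rw [if_neg h3]
  · rw [if_neg h1]
    show (if k + 1 ≤ t.length ∧ t.take (k + 1) = (pvLow fp).take (k + 1)
            then some (t.drop (k + 1)) else none) = none
    by_cases h3 : k + 1 ≤ t.length ∧ t.take (k + 1) = (pvLow fp).take (k + 1)
    · exfalso
      apply h1
      refine ⟨by omega, ?_⟩
      have := congrArg (List.take k) h3.2
      simpa [List.take_take] using this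
    · rw [if_neg h3]

theorem pvSfx_zero (fp : String) : pvSfx fp 0 = pvTL := by
  simp [pvSfx, pvTL, pvCommitTypesA]

theorem pvNilMemSfxE (fp : String) (k : Nat) :
    [] ∈ pvSfxE fp k ↔ ∃ t ∈ pvTL, t.length = k ∧ t.take k = (pvLow fp).take k := by
  simp only [pvSfxE, List.mem_filterMap]
  constructor
  · rintro ⟨t, ht, hval⟩
    by_cases hc : k ≤ t.length ∧ t.take k = (pvLow fp).take k
    · rw [if_pos hc] at hval
      have hdrop : t.drop k = [] := by simpa using hval
      have hle : t.length ≤ k := List.drop_eq_nil_iff.mp hdrop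
      exact ⟨t, ht, by omega, hc.2⟩
    · rw [if_neg hc] at hval
      cases hval
  · rintro ⟨t, ht, hlen, htake⟩
    exact ⟨t, ht, by rw [if_pos ⟨by omega, htake⟩]; simp [List.drop_eq_nil_iff, hlen]⟩

theorem pvMemSfxE (fp : String) (k : Nat) (t : List Char)
    (ht : t ∈ pvTL) (hk : k ≤ t.length) (htake : t.take k = (pvLow fp).take k) :
    t.drop k ∈ pvSfxE fp k := by
  simp only [pvSfxE, List.mem_filterMap]
  exact ⟨t, ht, by rw [if_pos ⟨hk, htake⟩]⟩

theorem pvSfxE_eq_sfx (fp : String) (k : Nat) (hnil : [] ∉ pvSfxE fp k) :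
    pvSfxE fp k = pvSfx fp k := by
  rw [pvSfxE, pvSfx]
  apply List.filterMap_congr
  intro t ht
  by_cases h1 : k ≤ t.length ∧ t.take k = (pvLow fp).take k
  · by_cases h2 : t.length = k
    · exfalso
      exact hnil ((pvNilMemSfxE fp k).mpr ⟨t, ht, h2, h1.2⟩)
    · rw [if_pos h1, if_pos ⟨by omega, h1.2⟩]
  · rw [if_neg h1, if_neg (fun hc => h1 ⟨by omega, hc.2⟩)]

-- prefix type of length k: t = (pvLow fp).take k and t <+: pvLow fp when k ≤ |pvLow|
theorem pvPrefixOfTake (fp : String) (k : Nat) (t : List Char)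
    (hlen : t.length = k) (htake : t.take k = (pvLow fp).take k) :
    t <+: pvLow fp := by
  have : t = (pvLow fp).take k := by
    rw [← htake, List.take_of_length_le (by omega)]
  rw [this]
  exact List.take_prefix _ _

-- t ∈ pvTL ↔ ∃ s ∈ pvCommitTypesA, s.toList = t
theorem pvTL_mem (t : List Char) (ht : t ∈ pvTL) :
    ∃ s ∈ pvCommitTypesA, s.toList = t := by
  simpa [pvTL] using ht

theorem pvScanInv (fp : String) : ∀ (rem : List Char) (k : Nat),
    rem = (pvLow fp).drop k →
    (∀ t ∈ pvCommitTypesA, t.toList <+: pvLow fp → k < t.toList.length) →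
    pvScan fp rem (k : Int) (pvSfx fp k) = pvOut fp := by
  intro rem
  induction rem with
  | nil =>
    intro k hrem hk
    have hkl : (pvLow fp).length ≤ k := by
      have := congrArg List.length hrem
      simp at this
      omega
    rw [pvScan]
    have hf : pvCommitTypesA.find? (pvPredOut fp) = none := by
      rw [List.find?_eq_none]
      intro t ht hp
      have hhit := (pvPredOut_iff fp t).mp hp
      have h1 := hk t ht hhit.1
      have h2 := hhit.1.length_le
      omega
    simp only [pvOut, hf]
  | cons ch rest ih =>
    intro k hrem hk
    have hhead : (pvLow fp)[k]? = some ch := by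
      have : ((pvLow fp).drop k).head? = some ch := by rw [← hrem]; rfl
      rwa [List.head?_drop] at this
    have hklt : k < (pvLow fp).length := by
      rcases List.getElem?_eq_some_iff.mp hhead with ⟨h, _⟩
      exact h
    have hrest : rest = (pvLow fp).drop (k + 1) := by
      have : ((pvLow fp).drop k).tail = rest := by rw [← hrem]; rfl
      rw [← this, List.tail_drop]
    rw [pvScan]
    simp only [pvStepSfx fp k ch hhead]
    by_cases hc : [] ∈ pvSfxE fp (k + 1)
    · rw [if_pos (by simpa [List.contains_iff_mem] using hc)]
      obtain ⟨t, ht, hlen, htake⟩ := (pvNilMemSfxE fp (k + 1)).mp hc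
      obtain ⟨s, hs, hst⟩ := pvTL_mem t ht
      have hpre : s.toList <+: pvLow fp := by
        rw [hst]; exact pvPrefixOfTake fp (k + 1) t hlen htake
      by_cases hstrict : (k : Int) + 1 < PySem.Str.len fp
      · rw [if_pos hstrict]
        have hstrictN : k + 1 < fp.toList.length := by
          rw [PySem.Str.len_eq] at hstrict
          omega
        have hhit : pvHit fp s := ⟨hpre, by rw [hst]; omega⟩
        have hf : pvCommitTypesA.find? (pvPredOut fp) = some s := by
          apply pvFindUnique _ _ s hs ((pvPredOut_iff fp s).mpr hhit)
          intro t' ht' hp'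
          exact pvHitUnique fp ht' hs ((pvPredOut_iff fp t').mp hp').1 hpre
        simp only [pvOut, hf]
        have hslice1 : PySem.Str.slice (PySem.Str.lower fp) none (some ((k : Int) + 1)) = s := by
          apply String.toList_inj.mp
          rw [PySem.Str.slice, String.toList_ofList]
          have : PySem.Chars.slice (PySem.Str.lower fp).toList none (some ((k : Int) + 1))
              = (PySem.Str.lower fp).toList.take ((k : Int) + 1).toNat :=
            PySem.List.slice_to _ (by omega)
          rw [this]
          have hlowlist : (PySem.Str.lower fp).toList = pvLow fp := by
            simp [PySem.Str.lower, String.toList_ofList, pvLow]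
          rw [hlowlist]
          have : ((k : Int) + 1).toNat = k + 1 := by omega
          rw [this, ← htake, hst, List.take_of_length_le (by omega)]
        have hlen2 : PySem.Str.len s = (k : Int) + 1 := by
          rw [PySem.Str.len_eq]
          have hsl : s.toList.length = k + 1 := by rw [hst]; omega
          omega
        rw [hslice1, hlen2]
      · rw [if_neg hstrict]
        -- the only prefix type is s, and it is not strict: no hit at all
        have hf : pvCommitTypesA.find? (pvPredOut fp) = none := by
          rw [List.find?_eq_none]
          intro t' ht' hp'
          have hhit' := (pvPredOut_iff fp t').mp hp'
          have : t' = s := pvHitUnique fp ht' hs hhit'.1 hpre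
          subst this
          have hlt : t'.toList.length < fp.toList.length := hhit'.2
          rw [hst] at hlt
          rw [PySem.Str.len_eq] at hstrict
          omega
        simp only [pvOut, hf]
    · rw [if_neg (by simpa [List.contains_iff_mem] using hc)]
      by_cases he : pvSfxE fp (k + 1) = []
      · rw [if_pos (by simp [he])]
        have hf : pvCommitTypesA.find? (pvPredOut fp) = none := by
          rw [List.find?_eq_none]
          intro t' ht' hp'
          have hhit' := (pvPredOut_iff fp t').mp hp'
          have hkt := hk t' ht' hhit'.1
          have htl : t'.toList ∈ pvTL := List.mem_map.mpr ⟨t', ht', rfl⟩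
          have htake' : t'.toList.take (k + 1) = (pvLow fp).take (k + 1) := by
            rw [List.prefix_iff_eq_take.mp hhit'.1, List.take_take]
            congr 1
            omega
          have hmem := pvMemSfxE fp (k + 1) t'.toList htl (by omega) htake'
          rw [he] at hmem
          exact absurd hmem List.not_mem_nil
        simp only [pvOut, hf]
      · rw [if_neg (by simpa [List.isEmpty_iff] using he)]
        have hknil : [] ∉ pvSfxE fp (k + 1) := hc
        rw [pvSfxE_eq_sfx fp (k + 1) hknil]
        have hcast : (k : Int) + 1 = ((k + 1 : Nat) : Int) := by push_cast; ring
        rw [hcast]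
        apply ih (k + 1) hrest
        intro t ht hpre
        have h1 := hk t ht hpre
        by_cases h2 : t.toList.length = k + 1
        · exfalso
          apply hknil
          apply (pvNilMemSfxE fp (k + 1)).mpr
          refine ⟨t.toList, by simp [pvTL]; exact ⟨t, ht, rfl⟩, h2, ?_⟩
          rw [List.prefix_iff_eq_take.mp hpre, List.take_take]
          congr 1
          omega
        · omega

theorem pvBOut (fp : String) : find_combined_type_and_scope_py_alt fp = pvOut fp := by
  rw [find_combined_type_and_scope_py_alt]
  have h1 : (PySem.Str.lower fp).toList = pvLow fp := by
    simp [PySem.Str.lower, String.toList_ofList, pvLow]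
  have h2 : pvCommitTypesA.map String.toList = pvSfx fp 0 := (pvSfx_zero fp).symm ▸ rfl
  rw [h1, h2]
  have := pvScanInv fp (pvLow fp) 0 (by simp) ?_
  · simpa using this
  · intro t ht hpre
    have : t ≠ "" := by
      rcases pvMemCases t ht with rfl|rfl|rfl|rfl|rfl|rfl|rfl|rfl|rfl|rfl|rfl|rfl <;> decide
    rcases pvMemCases t ht with rfl|rfl|rfl|rfl|rfl|rfl|rfl|rfl|rfl|rfl|rfl|rfl <;> decide

-- ===== VERDICT (by name: the statement is the Claim_ definition above) =====
theorem find_combined_type_and_scope_py_spec : Claim_equal_find_combined_type_and_scope_py := by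
  intro fp _
  unfold Spec_find_combined_type_and_scope_py
  rw [pvAOut fp, pvBOut fp]
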